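-- pv_equiv track=rewrite | github.com/qu-genesis/markov-ngram-generator | mtg.py | gram_counter
-- ===== SOURCE A (Python) =====
-- def gram_counter(sentence, n, corpus):
--     counter = {}
--     if n == 1:
--         for i in range(len(corpus)):
--             if corpus[i] not in counter:
--                 counter[corpus[i]] = 1
--             else:
--                 counter[corpus[i]] += 1
--                 pass
--             pass
--     else:
--         for i in range(len(corpus) - n + 1):
--             if sentence[-n + 1 :] == corpus[i : i + n - 1]:
--                 if corpus[i + n - 1] not in counter:
--                     counter[corpus[i + n - 1]] = 1
--                 else:
--                     counter[corpus[i + n - 1]] += 1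
--                     pass
--                 pass
--     return counter
-- ===== SOURCE B (Python) =====
-- def gram_counter(sentence, n, corpus):
--     # Build the complete successor index of the corpus (every (n-1)-window -> Counter
--     # of its following tokens) in one pass, then answer by a single lookup.
--     k = n - 1
--     index = {}
--     for j in range(k, len(corpus)):
--         key = tuple(corpus[j - k:j])
--         bucket = index.setdefault(key, {})
--         w = corpus[j]
--         bucket[w] = bucket.get(w, 0) + 1
--     ctx = tuple(sentence[-k:]) if k > 0 else ()
--     return index.get(ctx, {})
-- ===== Notes on version B (the rewrite author's own statement) =====
-- stated objective: alternative
-- what changed: B does not compare each corpus window against the query context at all: it builds the complete Markov successor index (a dict of Counters keyed by every (n-1)-window) in one pass over the corpus and then answers by a single dictionary lookup of the context, whereas A scans the corpus comparing every window slice against the context and mutates one counter in place.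
-- outside the precondition, e.g. on gram_counter(['a', 'b'], 0, []): A returns {}, B raises IndexError; on gram_counter(['b', 'a'], 0, ['b', 'a']): A returns {}, B returns {'b': 1, 'a': 1}; on gram_counter(['a'], 0, []): A raises IndexError, B raises IndexError
import Mathlib
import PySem

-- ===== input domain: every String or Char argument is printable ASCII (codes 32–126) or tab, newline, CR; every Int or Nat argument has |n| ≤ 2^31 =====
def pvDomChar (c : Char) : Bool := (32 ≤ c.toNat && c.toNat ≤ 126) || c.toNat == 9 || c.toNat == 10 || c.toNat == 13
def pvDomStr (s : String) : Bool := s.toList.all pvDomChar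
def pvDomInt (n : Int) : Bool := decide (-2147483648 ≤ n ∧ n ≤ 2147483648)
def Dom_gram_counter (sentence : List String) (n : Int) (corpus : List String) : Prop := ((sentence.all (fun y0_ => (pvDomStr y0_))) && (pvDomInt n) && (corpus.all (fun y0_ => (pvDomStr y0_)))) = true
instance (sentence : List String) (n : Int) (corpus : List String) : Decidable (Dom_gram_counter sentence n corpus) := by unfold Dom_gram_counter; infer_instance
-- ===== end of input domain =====

-- B builds the complete successor index (a dict of counters keyed by every (n-1)-window of the
-- corpus) in one pass and answers by a single lookup, instead of A's loop comparing each window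
-- slice against the context while mutating one counter (objective: alternative).


-- ===== PORT A =====
-- counter[w] not-in/else update, shared by both branches of A's loop
def gramStep (d : PySem.Dict String Int) (w : String) : PySem.Dict String Int :=
  if d.contains w = false then d.insert w 1 else d.insert w (d.getD w 0 + 1)

-- indices taken inside the loops are provably in range for n ≥ 1, so xs[i] is ported as pyGetD
def gram_counter (sentence : List String) (n : Int) (corpus : List String) : List (String × Int) :=
  let counter : PySem.Dict String Int :=
    if n == 1 then
      (PySem.List.pyRange 0 (PySem.List.len corpus) 1).foldl
        (fun d i => gramStep d (PySem.List.pyGetD corpus i "")) PySem.Dict.empty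
    else
      (PySem.List.pyRange 0 (PySem.List.len corpus - n + 1) 1).foldl
        (fun d i =>
          if PySem.List.slice sentence (some (-n + 1)) none ==
              PySem.List.slice corpus (some i) (some (i + n - 1)) then
            gramStep d (PySem.List.pyGetD corpus (i + n - 1) "")
          else d) PySem.Dict.empty
  counter.items

-- ===== PORT B =====
def gram_counter_alt (sentence : List String) (n : Int) (corpus : List String) : List (String × Int) :=
  let k := n - 1
  let index : PySem.Dict (List String) (PySem.Dict String Int) :=
    (PySem.List.pyRange k (PySem.List.len corpus) 1).foldl
      (fun d j =>
        let key := PySem.List.slice corpus (some (j - k)) (some j)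
        let bucket := (d.setdefault key PySem.Dict.empty).getD key PySem.Dict.empty
        let w := PySem.List.pyGetD corpus j ""
        (d.setdefault key PySem.Dict.empty).insert key
          (bucket.insert w (bucket.getD w 0 + 1)))
      PySem.Dict.empty
  let ctx := if 0 < k then PySem.List.slice sentence (some (-k)) none else []
  (index.getD ctx PySem.Dict.empty).items

-- ===== PRECONDITION & SPEC =====
-- Pre_ restricts to valid n-gram orders n ≥ 1, the function's natural domain: for n ≤ 0 A's
-- slicing/indexing relies on negative-index wraparound and raises IndexError on some inputs
-- (e.g. (["a"], 0, [])), so nothing is claimed there.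
def Pre_gram_counter (sentence : List String) (n : Int) (corpus : List String) : Prop := 1 ≤ n
instance (sentence : List String) (n : Int) (corpus : List String) : Decidable (Pre_gram_counter sentence n corpus) := by unfold Pre_gram_counter; infer_instance
def pvWitness_gram_counter : List String × Int × List String := (["a"], 2, ["a", "b", "a", "c", "a", "b"])

def Spec_gram_counter (sentence : List String) (n : Int) (corpus : List String) (out : List (String × Int)) : Prop := out = gram_counter_alt sentence n corpus
instance (sentence : List String) (n : Int) (corpus : List String) (out : List (String × Int)) : Decidable (Spec_gram_counter sentence n corpus out) := by unfold Spec_gram_counter; infer_instance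

-- ===== CLAIM (what is proved, stated in full; the proofs are below) =====
def Claim_equal_gram_counter : Prop := ∀ (sentence : List String) (n : Int) (corpus : List String), Dom_gram_counter sentence n corpus → Pre_gram_counter sentence n corpus → Spec_gram_counter sentence n corpus (gram_counter sentence n corpus)

-- ===== LEMMAS AND PROOFS =====

-- the counter update both programs perform, written as an unconditional insert
def gramBump (b : PySem.Dict String Int) (w : String) : PySem.Dict String Int :=
  b.insert w (b.getD w 0 + 1)

-- A's branching update is gramBump
theorem gramStep_eq_bump (d : PySem.Dict String Int) (w : String) :
    gramStep d w = gramBump d w := by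
  unfold gramStep gramBump
  by_cases h : d.contains w = false
  · simp [h, PySem.Dict.getD_of_not_contains]
  · simp [h]

-- B's loop body (setdefault + bucket mutation) is one insert of the bumped bucket
theorem stepB_eq (d : PySem.Dict (List String) (PySem.Dict String Int))
    (key : List String) (w : String) :
    ((d.setdefault key PySem.Dict.empty).insert key
      (((d.setdefault key PySem.Dict.empty).getD key PySem.Dict.empty).insert w
        (((d.setdefault key PySem.Dict.empty).getD key PySem.Dict.empty).getD w 0 + 1))) =
    d.insert key (gramBump (d.getD key PySem.Dict.empty) w) := by
  unfold gramBump
  by_cases h : d.contains key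
  · rw [PySem.Dict.setdefault_of_contains _ _ h]
  · rw [PySem.Dict.setdefault_of_not_contains _ _ (by simpa using h)]
    rw [PySem.Dict.getD_insert_self, PySem.Dict.insert_insert_self]
    simp [PySem.Dict.getD_of_not_contains _ _ (show d.contains key = false by simpa using h)]

-- invariant of B's index-building fold: the bucket at any fixed key c evolves exactly as a
-- conditional counter fold over the same index list
theorem getD_foldl_insert_bump (js : List Int) (key : Int → List String) (w : Int → String)
    (d : PySem.Dict (List String) (PySem.Dict String Int)) (c : List String) :
    ((js.foldl (fun d j => d.insert (key j) (gramBump (d.getD (key j) PySem.Dict.empty) (w j))) d).getD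
        c PySem.Dict.empty) =
    js.foldl (fun b j => if c = key j then gramBump b (w j) else b) (d.getD c PySem.Dict.empty) := by
  induction js generalizing d with
  | nil => rfl
  | cons j js ih =>
    simp only [List.foldl_cons, ih, PySem.Dict.getD_insert]
    by_cases h : c = key j <;> simp [h]

-- xs[a:a] is empty (B's window key for n = 1)
theorem slice_self_empty {α : Type} (xs : List α) (a : Int) :
    PySem.List.slice xs (some a) (some a) = [] := by
  apply List.eq_nil_of_length_eq_zero
  rw [PySem.List.length_slice]
  omega

theorem gram_counter_eq_alt (sentence : List String) (n : Int) (corpus : List String)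
    (hn : 1 ≤ n) : gram_counter sentence n corpus = gram_counter_alt sentence n corpus := by
  unfold gram_counter gram_counter_alt
  simp only [stepB_eq, gramStep_eq_bump, getD_foldl_insert_bump, PySem.Dict.getD_empty]
  by_cases h1 : n = 1
  · subst h1
    norm_num
    simp [slice_self_empty]
  · have hb : (n == 1) = false := by simpa using h1
    have hk : (0 : Int) < n - 1 := by omega
    simp only [hb, Bool.false_eq_true, if_false, if_pos hk]
    rw [PySem.List.foldl_if_eq_foldl_filter, PySem.List.foldl_ite_eq_foldl_filter]
    rw [← List.foldl_map (f := fun (i : Int) => PySem.List.pyGetD corpus (i + n - 1) "")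
        (g := gramBump),
        ← List.foldl_map (f := fun (j : Int) => PySem.List.pyGetD corpus j "") (g := gramBump)]
    have hS :
        ((PySem.List.pyRange 0 (PySem.List.len corpus - n + 1)).filter
            (fun i => PySem.List.slice sentence (some (-n + 1)) none ==
              PySem.List.slice corpus (some i) (some (i + n - 1)))).map
          (fun i => PySem.List.pyGetD corpus (i + n - 1) "") =
        ((PySem.List.pyRange (n - 1) (PySem.List.len corpus)).filter
            (fun j => decide (PySem.List.slice sentence (some (-(n - 1))) none =
              PySem.List.slice corpus (some (j - (n - 1))) (some j)))).map
          (fun j => PySem.List.pyGetD corpus j "") := by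
      rw [PySem.List.pyRange_one, PySem.List.pyRange_one]
      have hM : (PySem.List.len corpus - n + 1 - 0).toNat
          = (PySem.List.len corpus - (n - 1)).toNat := by omega
      rw [hM, List.filter_map, List.filter_map, List.map_map, List.map_map]
      have hp : ∀ m ∈ List.range (PySem.List.len corpus - (n - 1)).toNat,
          ((fun i => PySem.List.slice sentence (some (-n + 1)) none ==
              PySem.List.slice corpus (some i) (some (i + n - 1))) ∘ (fun m : Nat => (0 : Int) + m)) m =
          ((fun j => decide (PySem.List.slice sentence (some (-(n - 1))) none =
              PySem.List.slice corpus (some (j - (n - 1))) (some j))) ∘ (fun m : Nat => (n - 1) + m)) m := by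
        intro m _
        simp only [Function.comp]
        have e1 : (-n + 1 : Int) = -(n - 1) := by ring
        have e2 : (0 : Int) + m + n - 1 = (n - 1) + m := by ring
        have e3 : ((n : Int) - 1) + m - (n - 1) = 0 + m := by ring
        rw [e1, e2, e3]
        exact Bool.beq_eq_decide_eq _ _
      rw [List.filter_congr hp]
      apply List.map_congr_left
      intro m hm
      simp only [Function.comp]
      congr 1
      ring
    rw [hS]

-- ===== VERDICT (by name: the statement is the Claim_ definition above) =====
theorem gram_counter_spec : Claim_equal_gram_counter := by
  intro sentence n corpus _ hn
  exact gram_counter_eq_alt sentence n corpus hn
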